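-- pv_equiv track=rewrite | github.com/RaineDelay/LNK-parse | lnkparse/parser.py | get_hotkeys
-- ===== SOURCE A (Python) =====
-- def get_hotkeys(byte_arr):
--     nums = {k: chr(k) for k in range(0x30, 0x3A)}
--     letters = {k: chr(k) for k in range(0x41, 0x5B)}
--     fn = {k: "F{}".format(k) for k in range(1, 25)}
--     special = {0x0: "NONE", 0x90: "NUM LOCK", 0x91: "SCROLL LOCK"}
--     alphanums = {**nums, **letters}
--     regular = {**alphanums, **fn}
--     first_byte_options = {**regular, **special}
--     key_mods = {0: "NONE", 1: "SHIFT", 2: "CTRL", 3: "ALT"}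
--     return (key_mods[byte_arr[1]], first_byte_options[byte_arr[0]])
-- ===== SOURCE B (Python) =====
-- def get_hotkeys(byte_arr):
--     # B: replace all the precomputed dicts by direct classification of the two bytes.
--     mod_code = byte_arr[1]
--     if not (0 <= mod_code <= 3):
--         raise KeyError(mod_code)
--     mod = ("NONE", "SHIFT", "CTRL", "ALT")[mod_code]
--     k = byte_arr[0]
--     if 0x30 <= k < 0x3A or 0x41 <= k < 0x5B:
--         key = chr(k)
--     elif 1 <= k <= 24:
--         key = "F{}".format(k)
--     elif k == 0:
--         key = "NONE"
--     elif k == 0x90: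
--         key = "NUM LOCK"
--     elif k == 0x91:
--         key = "SCROLL LOCK"
--     else:
--         raise KeyError(k)
--     return (mod, key)
-- ===== Notes on version B (the rewrite author's own statement) =====
-- stated objective: simpler
-- what changed: Replaced the eight precomputed/merged dicts with direct range checks on the two bytes (chr for alphanumerics, 'F{}' for function keys, three literal specials, a 4-tuple for the modifier), doing no dict construction at all.
-- outside the precondition, e.g. on get_hotkeys([5, 7]): A raises KeyError, B raises KeyError; on get_hotkeys([65]): A raises IndexError, B raises IndexError
import Mathlib
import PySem

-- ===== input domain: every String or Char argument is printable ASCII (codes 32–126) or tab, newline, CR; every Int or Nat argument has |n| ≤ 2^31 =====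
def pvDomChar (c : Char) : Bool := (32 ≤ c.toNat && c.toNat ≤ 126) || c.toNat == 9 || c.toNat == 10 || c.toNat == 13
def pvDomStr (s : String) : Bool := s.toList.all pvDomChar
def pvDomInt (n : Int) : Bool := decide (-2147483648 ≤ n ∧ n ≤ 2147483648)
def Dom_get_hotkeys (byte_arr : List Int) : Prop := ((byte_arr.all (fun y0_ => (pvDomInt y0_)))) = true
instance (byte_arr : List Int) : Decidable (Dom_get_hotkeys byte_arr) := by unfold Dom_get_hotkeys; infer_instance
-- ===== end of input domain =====

-- B replaces A's eight precomputed/merged dicts with direct range checks on the two bytes (objective: simpler).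
-- Both Pythons raise (IndexError/KeyError) outside Pre_get_hotkeys; the ports return ("","") there (unclaimed).

-- ===== PORT A =====
-- {**d1, **d2} : later entries overwrite
def pvMerge (d1 d2 : PySem.Dict Int String) : PySem.Dict Int String :=
  d2.items.foldl (fun d kv => d.insert kv.1 kv.2) d1

def get_hotkeys (byte_arr : List Int) : String × String :=
  let nums : PySem.Dict Int String :=
    PySem.Dict.ofList ((PySem.List.pyRange 0x30 0x3A 1).map (fun k => (k, String.ofList [Char.ofNat k.toNat])))
  let letters : PySem.Dict Int String :=
    PySem.Dict.ofList ((PySem.List.pyRange 0x41 0x5B 1).map (fun k => (k, String.ofList [Char.ofNat k.toNat])))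
  let fn : PySem.Dict Int String :=
    PySem.Dict.ofList ((PySem.List.pyRange 1 25 1).map (fun k => (k, "F" ++ PySem.Int.toStr k)))
  let special : PySem.Dict Int String := PySem.Dict.ofList [(0, "NONE"), (0x90, "NUM LOCK"), (0x91, "SCROLL LOCK")]
  let alphanums := pvMerge nums letters
  let regular := pvMerge alphanums fn
  let first_byte_options := pvMerge regular special
  let key_mods : PySem.Dict Int String := PySem.Dict.ofList [(0, "NONE"), (1, "SHIFT"), (2, "CTRL"), (3, "ALT")]
  -- byte_arr[1] is evaluated first in Python; a none anywhere is a raise (outside Pre_)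
  ((do
    let i1 ← PySem.List.pyGet? byte_arr 1
    let i0 ← PySem.List.pyGet? byte_arr 0
    let m ← key_mods.get? i1
    let f ← first_byte_options.get? i0
    pure (m, f)) : Option (String × String)).getD ("", "")

-- ===== PORT B =====
def get_hotkeys_alt (byte_arr : List Int) : String × String :=
  match PySem.List.pyGet? byte_arr 1, PySem.List.pyGet? byte_arr 0 with
  | some m, some k =>
    if 0 ≤ m ∧ m ≤ 3 then
      let mod := (["NONE", "SHIFT", "CTRL", "ALT"].getD m.toNat "")
      let key :=
        if (0x30 ≤ k ∧ k < 0x3A) ∨ (0x41 ≤ k ∧ k < 0x5B) then String.ofList [Char.ofNat k.toNat]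
        else if 1 ≤ k ∧ k ≤ 24 then "F" ++ PySem.Int.toStr k
        else if k = 0 then "NONE"
        else if k = 0x90 then "NUM LOCK"
        else if k = 0x91 then "SCROLL LOCK"
        else ""  -- Python B raises KeyError here (outside Pre_)
      (mod, key)
    else ("", "")  -- Python B raises KeyError here (outside Pre_)
  | _, _ => ("", "")  -- IndexError (outside Pre_)

-- ===== PRECONDITION & SPEC =====
-- Pre_ excludes exactly the inputs where A raises: lists shorter than 2 (IndexError) and
-- bytes outside the dicts' key sets (KeyError); B raises there too.
def Pre_get_hotkeys (byte_arr : List Int) : Prop :=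
  2 ≤ byte_arr.length ∧
  (byte_arr.getD 1 0 = 0 ∨ byte_arr.getD 1 0 = 1 ∨ byte_arr.getD 1 0 = 2 ∨ byte_arr.getD 1 0 = 3) ∧
  (let k := byte_arr.getD 0 0
   (0x30 ≤ k ∧ k < 0x3A) ∨ (0x41 ≤ k ∧ k < 0x5B) ∨ (1 ≤ k ∧ k ≤ 24) ∨ k = 0 ∨ k = 0x90 ∨ k = 0x91)

instance (byte_arr : List Int) : Decidable (Pre_get_hotkeys byte_arr) := by
  unfold Pre_get_hotkeys; infer_instance

def pvWitness_get_hotkeys : List Int := [0x41, 2]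

def Spec_get_hotkeys (byte_arr : List Int) (out : String × String) : Prop := out = get_hotkeys_alt byte_arr
instance (byte_arr : List Int) (out : String × String) : Decidable (Spec_get_hotkeys byte_arr out) := by unfold Spec_get_hotkeys; infer_instance

-- ===== CLAIM (what is proved, stated in full; the proofs are below) =====
def Claim_equal_get_hotkeys : Prop := ∀ (byte_arr : List Int), Dom_get_hotkeys byte_arr → Pre_get_hotkeys byte_arr → Spec_get_hotkeys byte_arr (get_hotkeys byte_arr)

-- ===== LEMMAS AND PROOFS =====

set_option maxHeartbeats 4000000 in
set_option maxRecDepth 8000 in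
theorem pointwise (k m : Int)
    (hm : m = 0 ∨ m = 1 ∨ m = 2 ∨ m = 3)
    (hk : (0x30 ≤ k ∧ k < 0x3A) ∨ (0x41 ≤ k ∧ k < 0x5B) ∨ (1 ≤ k ∧ k ≤ 24) ∨ k = 0 ∨ k = 0x90 ∨ k = 0x91)
    (rest : List Int) :
    get_hotkeys (k :: m :: rest) = get_hotkeys_alt (k :: m :: rest) := by
  have h1 : PySem.List.pyGet? (k :: m :: rest) 1 = some m := by
    rw [show (1:Int) = ((1:Nat):Int) from rfl, PySem.List.pyGet?_natCast]; rfl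
  have h0 : PySem.List.pyGet? (k :: m :: rest) 0 = some k :=
    PySem.List.pyGet?_zero_cons _ _
  rcases hm with rfl | rfl | rfl | rfl <;>
    rcases hk with ⟨h, h'⟩ | ⟨h, h'⟩ | ⟨h, h'⟩ | rfl | rfl | rfl <;>
    simp only [get_hotkeys, get_hotkeys_alt, h0, h1] <;>
    first
      | decide
      | (interval_cases k <;> decide)

-- ===== VERDICT (by name: the statement is the Claim_ definition above) =====
theorem get_hotkeys_spec : Claim_equal_get_hotkeys := by
  intro byte_arr _ hpre
  obtain ⟨hlen, hm, hk⟩ := hpre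
  match byte_arr, hlen with
  | k :: m :: rest, _ =>
    exact pointwise k m hm hk rest
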